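-- pv_equiv track=rewrite | github.com/adalfarus/Home-Romee-Server | frontend_server/src/analyze.py | calc_games_and_absences
-- ===== SOURCE A (Python) =====
-- def calc_games_and_absences(sessions, main_idx):
--     games = absences = 0
--     for session in sessions:
--         for game in session:
--             val = game[main_idx]
--             if val == 1:
--                 absences += 1
--             else:
--                 games += 1
--     return games, absences
-- ===== SOURCE B (Python) =====
-- def _count_range(flat, lo, hi, main_idx):
--     # divide and conquer over the flattened game list
--     if lo == hi:
--         return 0, 0
--     if hi - lo == 1:
--         return (0, 1) if flat[lo][main_idx] == 1 else (1, 0)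
--     mid = (lo + hi) // 2
--     g1, a1 = _count_range(flat, lo, mid, main_idx)
--     g2, a2 = _count_range(flat, mid, hi, main_idx)
--     return g1 + g2, a1 + a2
--
--
-- def calc_games_and_absences(sessions, main_idx):
--     flat = [game for session in sessions for game in session]
--     return _count_range(flat, 0, len(flat), main_idx)
-- ===== Notes on version B (the rewrite author's own statement) =====
-- stated objective: alternative
-- what changed: B flattens the sessions once and counts (games, absences) by divide-and-conquer on index ranges of the flat list, combining half-results by pairwise addition, instead of A's nested loops with two running counters.
import Mathlib
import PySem

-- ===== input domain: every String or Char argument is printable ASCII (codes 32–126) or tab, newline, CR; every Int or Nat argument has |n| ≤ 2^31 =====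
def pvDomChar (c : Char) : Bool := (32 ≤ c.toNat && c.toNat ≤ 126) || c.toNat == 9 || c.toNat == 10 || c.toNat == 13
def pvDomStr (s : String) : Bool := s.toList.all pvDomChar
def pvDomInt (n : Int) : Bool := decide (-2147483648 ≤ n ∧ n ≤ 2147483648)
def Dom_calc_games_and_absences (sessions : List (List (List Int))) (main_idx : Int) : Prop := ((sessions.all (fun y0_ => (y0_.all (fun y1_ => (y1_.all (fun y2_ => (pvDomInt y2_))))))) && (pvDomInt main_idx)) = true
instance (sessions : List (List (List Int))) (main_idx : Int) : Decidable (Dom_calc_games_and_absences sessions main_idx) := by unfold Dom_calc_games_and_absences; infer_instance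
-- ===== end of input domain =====

-- B flattens the sessions once and counts by divide-and-conquer on index ranges; objective: alternative.

-- ===== PORT A =====
-- A: two counters, nested for loops, if/else on each element.
def calc_games_and_absences (sessions : List (List (List Int))) (main_idx : Int) : Int × Int :=
  let st :=
    sessions.foldl (fun st session =>
      session.foldl (fun st game =>
        let val := PySem.List.pyGetD game main_idx 0   -- game[main_idx]; exact under Pre_
        if val = 1 then (st.1, st.2 + 1) else (st.1 + 1, st.2)) st) ((0 : Int), (0 : Int))
  (st.1, st.2)

-- ===== PORT B =====
-- _count_range: divide and conquer on the half-open index range [lo, hi) of flat.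
-- (The base guard is `hi ≤ lo` rather than Python's `lo == hi` only to make the Nat
-- recursion total; on every call the function actually makes, lo ≤ hi, so they agree.)
def pvCountRange (flat : List (List Int)) (lo hi : Nat) (main_idx : Int) : Int × Int :=
  if hi ≤ lo then (0, 0)
  else if hi - lo = 1 then
    if PySem.List.pyGetD (flat.getD lo []) main_idx 0 = 1 then (0, 1) else (1, 0)   -- flat[lo][main_idx]; exact under Pre_
  else
    let mid := (lo + hi) / 2
    let p1 := pvCountRange flat lo mid main_idx
    let p2 := pvCountRange flat mid hi main_idx
    (p1.1 + p2.1, p1.2 + p2.2)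
termination_by hi - lo
decreasing_by all_goals omega

def calc_games_and_absences_alt (sessions : List (List (List Int))) (main_idx : Int) : Int × Int :=
  let flat := sessions.flatMap (fun session => session)
  pvCountRange flat 0 flat.length main_idx

-- ===== PRECONDITION & SPEC =====
-- Pre_ excludes exactly the inputs where game[main_idx] raises IndexError in both programs.
def Pre_calc_games_and_absences (sessions : List (List (List Int))) (main_idx : Int) : Prop :=
  ∀ session ∈ sessions, ∀ game ∈ session, PySem.Raise.InRange game.length main_idx
instance (sessions : List (List (List Int))) (main_idx : Int) : Decidable (Pre_calc_games_and_absences sessions main_idx) := by unfold Pre_calc_games_and_absences; infer_instance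

def pvWitness_calc_games_and_absences : List (List (List Int)) × Int := ([[[1, 0], [0, 1]], [[2, 3]]], 0)

def Spec_calc_games_and_absences (sessions : List (List (List Int))) (main_idx : Int) (out : Int × Int) : Prop := out = calc_games_and_absences_alt sessions main_idx
instance (sessions : List (List (List Int))) (main_idx : Int) (out : Int × Int) : Decidable (Spec_calc_games_and_absences sessions main_idx out) := by unfold Spec_calc_games_and_absences; infer_instance

-- ===== CLAIM (what is proved, stated in full; the proofs are below) =====
def Claim_equal_calc_games_and_absences : Prop := ∀ (sessions : List (List (List Int))) (main_idx : Int), Dom_calc_games_and_absences sessions main_idx → Pre_calc_games_and_absences sessions main_idx → Spec_calc_games_and_absences sessions main_idx (calc_games_and_absences sessions main_idx)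

-- ===== LEMMAS AND PROOFS =====

-- the predicate "this game is an absence"
def pvAbs (mi : Int) (g : List Int) : Bool := PySem.List.pyGetD g mi 0 = 1

-- A's inner loop from (g, a) adds (#non-absences, #absences) of the session.
theorem pv_inner_a (mi : Int) (s : List (List Int)) (g a : Int) :
    s.foldl (fun st game =>
        let val := PySem.List.pyGetD game mi 0
        if val = 1 then (st.1, st.2 + 1) else (st.1 + 1, st.2)) (g, a)
      = (g + (s.countP (fun x => !pvAbs mi x) : Int), a + (s.countP (pvAbs mi) : Int)) := by
  induction s generalizing g a with
  | nil => simp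
  | cons x t ih =>
    by_cases h : PySem.List.pyGetD x mi 0 = 1 <;>
      simp only [List.foldl_cons, h, if_true, if_false] <;>
      rw [ih] <;>
      refine Prod.ext ?_ ?_ <;>
      simp [pvAbs, h] <;> ring

-- A's nested loops compute the counts over the flattened list.
theorem pv_a_counts (mi : Int) (ss : List (List (List Int))) (g a : Int) :
    ss.foldl (fun st session =>
        session.foldl (fun st game =>
          let val := PySem.List.pyGetD game mi 0
          if val = 1 then (st.1, st.2 + 1) else (st.1 + 1, st.2)) st) (g, a)
      = (g + ((ss.flatMap (fun s => s)).countP (fun x => !pvAbs mi x) : Int),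
         a + ((ss.flatMap (fun s => s)).countP (pvAbs mi) : Int)) := by
  induction ss generalizing g a with
  | nil => simp
  | cons s t ih =>
    simp only [List.foldl_cons, pv_inner_a, ih, List.flatMap_cons, List.countP_append]
    refine Prod.ext ?_ ?_ <;> push_cast <;> ring

-- the segment [lo, hi) of flat
def pvSeg (flat : List (List Int)) (lo hi : Nat) : List (List Int) :=
  (flat.drop lo).take (hi - lo)

-- B's divide-and-conquer computes the counts over the segment.
theorem pv_dc_counts (flat : List (List Int)) (mi : Int) :
    ∀ n lo hi, hi - lo ≤ n → hi ≤ flat.length →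
      pvCountRange flat lo hi mi
        = (((pvSeg flat lo hi).countP (fun x => !pvAbs mi x) : Int),
           ((pvSeg flat lo hi).countP (pvAbs mi) : Int)) := by
  intro n
  induction n with
  | zero =>
    intro lo hi h1 _
    rw [pvCountRange]
    simp only [if_pos (by omega : hi ≤ lo)]
    simp [pvSeg, show hi - lo = 0 by omega]
  | succ n ih =>
    intro lo hi h1 h2
    rw [pvCountRange]
    by_cases hle : hi ≤ lo
    · simp only [if_pos hle]
      simp [pvSeg, show hi - lo = 0 by omega]
    · simp only [if_neg hle]
      by_cases hone : hi - lo = 1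
      · simp only [if_pos hone]
        have hlt : lo < flat.length := by omega
        have hseg : pvSeg flat lo hi = [flat[lo]] := by
          unfold pvSeg
          rw [hone, List.drop_eq_getElem_cons hlt]
          rfl
        have hgetD : flat.getD lo [] = flat[lo] := by
          simp [List.getD_eq_getElem?_getD, List.getElem?_eq_getElem hlt]
        rw [hseg, hgetD]
        by_cases hv : PySem.List.pyGetD flat[lo] mi 0 = 1 <;>
          simp [hv, pvAbs]
      · simp only [if_neg hone]
        have hmidlo : lo < (lo + hi) / 2 := by omega
        have hmidhi : (lo + hi) / 2 < hi := by omega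
        rw [ih lo ((lo + hi) / 2) (by omega) (by omega),
            ih ((lo + hi) / 2) hi (by omega) h2]
        have hsplit : pvSeg flat lo hi
            = pvSeg flat lo ((lo + hi) / 2) ++ pvSeg flat ((lo + hi) / 2) hi := by
          unfold pvSeg
          rw [show hi - lo = ((lo + hi) / 2 - lo) + (hi - (lo + hi) / 2) by omega,
              List.take_add, List.drop_drop]
          rw [show lo + ((lo + hi) / 2 - lo) = (lo + hi) / 2 by omega]
        rw [hsplit]
        simp only [List.countP_append]
        refine Prod.ext ?_ ?_ <;> push_cast <;> ring

-- ===== VERDICT (by name: the statement is the Claim_ definition above) =====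
theorem calc_games_and_absences_spec : Claim_equal_calc_games_and_absences := by
  intro sessions main_idx _ _
  unfold Spec_calc_games_and_absences calc_games_and_absences calc_games_and_absences_alt
  have hA := pv_a_counts main_idx sessions 0 0
  have hB := pv_dc_counts (sessions.flatMap (fun s => s)) main_idx
    (sessions.flatMap (fun s => s)).length 0 (sessions.flatMap (fun s => s)).length
    (le_refl _) (le_refl _)
  have hseg : pvSeg (sessions.flatMap (fun s => s)) 0 (sessions.flatMap (fun s => s)).length
      = sessions.flatMap (fun s => s) := by simp [pvSeg]
  rw [hseg] at hB
  simp only [hA, hB, zero_add]
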